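-- pv_equiv track=rewrite | github.com/tangjiewei0336/ascii_choir | parser.py | _strip_instrument_tag
-- ===== SOURCE A (Python) =====
-- from typing import Optional
--
-- VALID_INSTRUMENT_TAGS = {"grand_piano", "piano", "violin", "cello", "trumpet", "clarinet", "oboe", "alto_sax", "tenor_sax", "bass", "guitar"}
--
-- def _strip_instrument_tag(line: str) -> tuple[str, Optional[str]]:
--     """从行首剥离 [cello][guitar] 等乐器标记，返回 (剩余行, 乐器名或 None)。"""
--     rest = line.lstrip()
--     instrument: Optional[str] = None
--     while rest.startswith("["):
--         end = _find_matching_bracket(rest, 0)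
--         if end < 0:
--             break
--         inner = rest[1:end].strip().lower()
--         if inner in VALID_INSTRUMENT_TAGS:
--             instrument = "grand_piano" if inner == "piano" else inner
--             rest = rest[end + 1 :].lstrip()
--         else:
--             break  # [8va][8vb] 等非乐器标记不剥离
--     return rest, instrument
--
-- def _find_matching_bracket(s: str, start: int) -> int:
--     """从 start 找 [ 对应的 ]"""
--     depth = 0
--     for i in range(start, len(s)):
--         if s[i] == "[":
--             depth += 1
--         elif s[i] == "]":
--             depth -= 1
--             if depth == 0:
--                 return i
--     return -1
-- ===== SOURCE B (Python) =====
-- from typing import Optional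
--
-- VALID_INSTRUMENT_TAGS = {"grand_piano", "piano", "violin", "cello", "trumpet", "clarinet", "oboe", "alto_sax", "tenor_sax", "bass", "guitar"}
--
-- def _strip_instrument_tag(line: str) -> tuple[str, Optional[str]]:
--     """Strip leading [cello][guitar] instrument tags; return (rest, instrument or None)."""
--     rest = line.lstrip()
--     instrument: Optional[str] = None
--     while rest.startswith("["):
--         inner, sep, tail = rest[1:].partition("]")
--         if not sep or "[" in inner:
--             break  # unterminated or nested bracket: never a valid tag
--         tag = inner.strip().lower()
--         if tag not in VALID_INSTRUMENT_TAGS: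
--             break
--         instrument = "grand_piano" if tag == "piano" else tag
--         rest = tail.lstrip()
--     return rest, instrument
-- ===== Notes on version B (the rewrite author's own statement) =====
-- stated objective: simpler
-- what changed: Replaces the hand-written depth-counting _find_matching_bracket scanner with str.partition at the first closing bracket (rejecting an interior opening bracket), removing the helper function entirely; nested brackets can never form a valid tag, so the behaviour is identical.
import Mathlib
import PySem

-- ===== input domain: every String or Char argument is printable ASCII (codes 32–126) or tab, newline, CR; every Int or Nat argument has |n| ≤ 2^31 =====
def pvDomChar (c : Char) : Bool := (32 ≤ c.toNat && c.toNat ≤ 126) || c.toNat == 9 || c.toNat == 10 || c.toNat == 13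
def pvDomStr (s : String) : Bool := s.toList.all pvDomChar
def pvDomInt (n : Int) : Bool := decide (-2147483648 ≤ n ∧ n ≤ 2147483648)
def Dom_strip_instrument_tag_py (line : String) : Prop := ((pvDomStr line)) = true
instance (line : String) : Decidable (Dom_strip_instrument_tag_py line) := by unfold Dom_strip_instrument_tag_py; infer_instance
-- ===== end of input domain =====

-- B replaces A's hand-written depth-counting bracket scanner with a partition at the
-- first ']' (rejecting an interior '['), which is simpler; same cost, return value proved equal.

-- the VALID_INSTRUMENT_TAGS set (shared constant, used by both ports)
def pvValidTags : List (List Char) :=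
  ["grand_piano".toList, "piano".toList, "violin".toList, "cello".toList, "trumpet".toList,
   "clarinet".toList, "oboe".toList, "alto_sax".toList, "tenor_sax".toList, "bass".toList, "guitar".toList]

-- ===== PORT A =====
-- the `for i in range(start, len(s))` loop of _find_matching_bracket, carrying (i, depth)
def pvFmbAux : List Char → Int → Int → Int
  | [], _, _ => -1
  | c :: t, i, depth =>
    if c = '[' then pvFmbAux t (i + 1) (depth + 1)
    else if c = ']' then (if depth - 1 = 0 then i else pvFmbAux t (i + 1) (depth - 1))
    else pvFmbAux t (i + 1) depth

-- _find_matching_bracket(s, start); A only calls it with start = 0 (exact there)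
def find_matching_bracket_py (s : List Char) (start : Int) : Int :=
  pvFmbAux (PySem.List.slice s (some start) none) start 0

-- the `while rest.startswith("[")` loop of A
def pvALoop (rest : List Char) (instrument : Option (List Char)) : List Char × Option (List Char) :=
  if hs : PySem.Chars.startswith rest "[".toList = true then
    let e := find_matching_bracket_py rest 0
    if he : e < 0 then (rest, instrument)
    else
      let inner := PySem.Chars.lower (PySem.Chars.strip (PySem.List.slice rest (some 1) (some e)))
      if inner ∈ pvValidTags then
        pvALoop (PySem.Chars.lstrip (PySem.List.slice rest (some (e + 1)) none))
                (some (if inner = "piano".toList then "grand_piano".toList else inner))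
      else (rest, instrument)
  else (rest, instrument)
termination_by rest.length
decreasing_by
  have hne : rest ≠ [] := by
    intro h; subst h; simp [PySem.Chars.startswith, List.isPrefixOf] at hs
  have h0 : (0 : Int) ≤ e + 1 := by omega
  have : PySem.List.slice rest (some (e + 1)) none = rest.drop (e + 1).toNat := by
    exact PySem.List.slice_from rest h0
  calc (PySem.Chars.lstrip (PySem.List.slice rest (some (e + 1)) none)).length
      ≤ (PySem.List.slice rest (some (e + 1)) none).length :=
        List.length_dropWhile_le _ _
    _ = (rest.drop (e + 1).toNat).length := by rw [this]
    _ < rest.length := by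
        rw [List.length_drop]
        have : 1 ≤ (e + 1).toNat := by omega
        have : 0 < rest.length := List.length_pos_iff.mpr hne
        omega

def strip_instrument_tag_py (line : String) : String × Option String :=
  let r := pvALoop (PySem.Chars.lstrip line.toList) none
  (String.mk r.1, r.2.map String.mk)

-- ===== PORT B =====
-- the `while rest.startswith("[")` loop of B; `rest[1:].partition("]")` is ported as the
-- split of t at the first ']' — inner = takeWhile (≠ ']'), sep+tail = dropWhile (≠ ']') (exact)
def pvBLoop (rest : List Char) (instrument : Option (List Char)) : List Char × Option (List Char) :=
  match rest with
  | '[' :: t =>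
    let inner := t.takeWhile (fun c => c ≠ ']')
    let found := t.dropWhile (fun c => c ≠ ']')
    if hb : found.isEmpty || '[' ∈ inner then ('[' :: t, instrument)
    else
      let tag := PySem.Chars.lower (PySem.Chars.strip inner)
      if tag ∈ pvValidTags then
        pvBLoop (PySem.Chars.lstrip (found.drop 1))
                (some (if tag = "piano".toList then "grand_piano".toList else tag))
      else ('[' :: t, instrument)
  | r => (r, instrument)
termination_by rest.length
decreasing_by
  have hfe : found ≠ [] := by
    intro h; rw [h] at hb; simp at hb
  have h1 : found.length ≤ t.length := List.length_dropWhile_le _ _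
  have h2 : 0 < found.length := List.length_pos_iff.mpr hfe
  calc (PySem.Chars.lstrip (found.drop 1)).length
      ≤ (found.drop 1).length := List.length_dropWhile_le _ _
    _ = found.length - 1 := by rw [List.length_drop]
    _ < t.length + 1 := by omega
    _ = ('[' :: t).length := by simp

def strip_instrument_tag_py_alt (line : String) : String × Option String :=
  let r := pvBLoop (PySem.Chars.lstrip line.toList) none
  (String.mk r.1, r.2.map String.mk)

-- ===== PRECONDITION & SPEC =====
def Spec_strip_instrument_tag_py (line : String) (out : String × Option String) : Prop := out = strip_instrument_tag_py_alt line
instance (line : String) (out : String × Option String) : Decidable (Spec_strip_instrument_tag_py line out) := by unfold Spec_strip_instrument_tag_py; infer_instance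

-- ===== CLAIM (what is proved, stated in full; the proofs are below) =====
def Claim_equal_strip_instrument_tag_py : Prop := ∀ (line : String), Dom_strip_instrument_tag_py line → Spec_strip_instrument_tag_py line (strip_instrument_tag_py line)

-- ===== LEMMAS AND PROOFS =====

-- the scanner returns -1 when the string has no ']'
theorem pvFmbAux_no_close (s : List Char) (i d : Int) (h : ']' ∉ s) :
    pvFmbAux s i d = -1 := by
  induction s generalizing i d with
  | nil => rfl
  | cons c t ih =>
    simp only [List.mem_cons, not_or] at h
    have hc2 : c ≠ ']' := fun h0 => h.1 h0.symm
    by_cases hc : c = '['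
    · simp [pvFmbAux, hc, ih _ _ h.2]
    · simp [pvFmbAux, hc, hc2, ih _ _ h.2]

-- the scanner's result, when not -1, is ≥ the running index
theorem pvFmbAux_ge (s : List Char) (i d : Int) :
    pvFmbAux s i d = -1 ∨ i ≤ pvFmbAux s i d := by
  induction s generalizing i d with
  | nil => left; rfl
  | cons c t ih =>
    by_cases hc : c = '['
    · rw [show pvFmbAux (c :: t) i d = pvFmbAux t (i + 1) (d + 1) from by simp [pvFmbAux, hc]]
      rcases ih (i + 1) (d + 1) with h | h
      · left; exact h
      · right; omega
    · by_cases hc2 : c = ']'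
      · rw [show pvFmbAux (c :: t) i d = (if d - 1 = 0 then i else pvFmbAux t (i + 1) (d - 1))
            from by simp [pvFmbAux, hc, hc2]]
        by_cases hd : d - 1 = 0
        · right; simp [hd]
        · rw [if_neg hd]
          rcases ih (i + 1) (d - 1) with h | h
          · left; exact h
          · right; omega
      · rw [show pvFmbAux (c :: t) i d = pvFmbAux t (i + 1) d from by simp [pvFmbAux, hc, hc2]]
        rcases ih (i + 1) d with h | h
        · left; exact h
        · right; omega

-- scanning past bracket-free characters only advances the index
theorem pvFmbAux_skip (a : List Char) (s : List Char) (i d : Int)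
    (h : ∀ c ∈ a, c ≠ '[' ∧ c ≠ ']') :
    pvFmbAux (a ++ s) i d = pvFmbAux s (i + a.length) d := by
  induction a generalizing i with
  | nil => simp
  | cons c t ih =>
    have hc := h c (by simp)
    have ht : ∀ c ∈ t, c ≠ '[' ∧ c ≠ ']' := fun c hc => h c (by simp [hc])
    simp only [List.cons_append, pvFmbAux, hc.1, hc.2, if_false, ih _ ht, List.length_cons]
    congr 1
    push_cast
    ring

-- a non-space character survives strip, and '[' survives lower
theorem mem_dropWhile_of_mem {x : Char} {l : List Char} {p : Char → Bool}
    (h : x ∈ l) (hp : p x = false) : x ∈ l.dropWhile p := by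
  induction l with
  | nil => simp at h
  | cons c t ih =>
    by_cases hc : p c
    · rw [List.dropWhile_cons_of_pos hc]
      rcases List.mem_cons.mp h with rfl | h2
      · rw [hp] at hc; simp at hc
      · exact ih h2
    · rwa [List.dropWhile_cons_of_neg hc]

theorem mem_strip_of_mem {x : Char} {l : List Char}
    (h : x ∈ l) (hp : PySem.Chars.isspace x = false) : x ∈ PySem.Chars.strip l := by
  unfold PySem.Chars.strip PySem.Chars.rstrip PySem.Chars.lstrip
  rw [List.mem_reverse]
  exact mem_dropWhile_of_mem (by rw [List.mem_reverse]; exact mem_dropWhile_of_mem h hp) hp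

theorem bracket_mem_lower {l : List Char} (h : '[' ∈ l) :
    '[' ∈ PySem.Chars.lower l := by
  unfold PySem.Chars.lower
  exact List.mem_map.mpr ⟨'[', h, by decide⟩

-- no valid instrument tag contains '['
theorem bracket_not_valid {l : List Char} (h : '[' ∈ l) : l ∉ pvValidTags := by
  intro hm
  simp only [pvValidTags, List.mem_cons, List.not_mem_nil, or_false] at hm
  rcases hm with rfl | rfl | rfl | rfl | rfl | rfl | rfl | rfl | rfl | rfl | rfl <;> revert h <;> decide

-- head of dropWhile (≠ a), when nonempty, is a
theorem dropWhile_head_eq {α : Type} [DecidableEq α] {a : α} (l : List α) (x : α) (xs : List α)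
    (h : l.dropWhile (fun c => c ≠ a) = x :: xs) : x = a := by
  have w : l.dropWhile (fun c => decide (c ≠ a)) ≠ [] := by rw [h]; exact List.cons_ne_nil _ _
  have h2 := List.head_dropWhile_not (fun c => decide (c ≠ a)) w
  simp only [h, List.head_cons] at h2
  simpa using h2

-- a tag slice containing '[' sends A to the break branch
theorem inner_not_valid_of_bracket {l : List Char} (h : '[' ∈ l) :
    PySem.Chars.lower (PySem.Chars.strip l) ∉ pvValidTags :=
  bracket_not_valid (bracket_mem_lower (mem_strip_of_mem h (by decide)))

-- the main loop equivalence
theorem loop_eq (n : Nat) : ∀ (rest : List Char), rest.length ≤ n →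
    ∀ (instrument : Option (List Char)), pvALoop rest instrument = pvBLoop rest instrument := by
  induction n with
  | zero =>
    intro rest hr instrument
    have : rest = [] := List.length_eq_zero_iff.mp (Nat.le_zero.mp hr)
    subst this
    rw [pvALoop, pvBLoop]
    · simp [PySem.Chars.startswith, List.isPrefixOf]
    · simp
  | succ n ih =>
    intro rest hr instrument
    match rest with
    | [] =>
      rw [pvALoop, pvBLoop]
      · simp [PySem.Chars.startswith, List.isPrefixOf]
      · simp
    | c :: t =>
      by_cases hc : c = '['
      · subst hc
        -- e = pvFmbAux t 1 1
        have hslice0 : PySem.List.slice ('[' :: t) (some 0) none = '[' :: t := by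
          have := PySem.List.slice_from ('[' :: t) (a := 0) (by omega)
          simpa using this
        have he0 : find_matching_bracket_py ('[' :: t) 0 = pvFmbAux t 1 1 := by
          unfold find_matching_bracket_py
          rw [hslice0]
          simp [pvFmbAux]
        by_cases hcl : ']' ∈ t
        · -- t = a ++ ']' :: b with ']' ∉ a
          set a := t.takeWhile (fun c => c ≠ ']') with ha
          set f := t.dropWhile (fun c => c ≠ ']') with hf
          have hsplit : a ++ f = t := List.takeWhile_append_dropWhile
          have hfne : f ≠ [] := by
            intro h0
            rw [List.dropWhile_eq_nil_iff] at h0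
            have := h0 ']' hcl
            simp at this
          have hfhead : ∃ b, f = ']' :: b := by
            cases hfe : f with
            | nil => exact absurd hfe hfne
            | cons x b =>
              have hx := dropWhile_head_eq t x b (hf.symm ▸ hfe)
              exact ⟨b, by rw [hx]⟩
          obtain ⟨b, hb⟩ := hfhead
          have hano : ']' ∉ a := by
            intro hmem
            have := List.mem_takeWhile_imp (ha ▸ hmem)
            simp at this
          by_cases hbr : '[' ∈ a
          · -- nested: both break
            -- a = a1 ++ '[' :: a2 with no brackets in a1
            set a1 := a.takeWhile (fun c => c ≠ '[') with ha1
            set g := a.dropWhile (fun c => c ≠ '[') with hg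
            have hsplit1 : a1 ++ g = a := List.takeWhile_append_dropWhile
            have hgne : g ≠ [] := by
              intro h0
              rw [List.dropWhile_eq_nil_iff] at h0
              have := h0 '[' hbr
              simp at this
            have hghead : ∃ a2, g = '[' :: a2 := by
              cases hge : g with
              | nil => exact absurd hge hgne
              | cons x a2 =>
                have hx := dropWhile_head_eq a x a2 (hg.symm ▸ hge)
                exact ⟨a2, by rw [hx]⟩
            obtain ⟨a2, hg2⟩ := hghead
            have ha1no : ∀ x ∈ a1, x ≠ '[' ∧ x ≠ ']' := by
              intro x hx
              constructor
              · have := List.mem_takeWhile_imp (ha1 ▸ hx)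
                simpa using this
              · intro h0; subst h0
                exact hano (hsplit1 ▸ List.mem_append_left _ hx)
            -- value of e
            have ht_decomp : t = a1 ++ '[' :: (a2 ++ f) := by
              rw [← hsplit, ← hsplit1, hg2]; simp
            have hstep : ∀ (j : Int), pvFmbAux ('[' :: (a2 ++ f)) j 1 = pvFmbAux (a2 ++ f) (j + 1) 2 := by
              intro j; simp [pvFmbAux]
            have he_val : pvFmbAux t 1 1 = pvFmbAux (a2 ++ f) (a1.length + 2) 2 := by
              rw [ht_decomp, pvFmbAux_skip a1 _ 1 1 ha1no, hstep]
              congr 1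
              ring
            -- B breaks
            have hbB : pvBLoop ('[' :: t) instrument = ('[' :: t, instrument) := by
              rw [pvBLoop]
              simp only [← ha, ← hf]
              rw [dif_pos (by simp [hbr])]
            rw [hbB, pvALoop]
            rw [dif_pos (by simp [PySem.Chars.startswith, List.isPrefixOf])]
            simp only [he0, he_val]
            rcases pvFmbAux_ge (a2 ++ f) (a1.length + 2) 2 with hneg | hge
            · rw [dif_pos (by rw [hneg]; norm_num)]
            · rw [dif_neg (by omega)]
              -- inner contains '['
              set e := pvFmbAux (a2 ++ f) (a1.length + 2) 2 with hee
              have hinner_mem : '[' ∈ PySem.List.slice ('[' :: t) (some 1) (some e) := by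
                have he1 : (1 : Int) = ((1 : Nat) : Int) := by norm_num
                have he2 : e = ((e.toNat : Nat) : Int) := by omega
                rw [he1, he2, PySem.List.slice_natCast]
                simp only [List.drop_one, List.tail_cons]
                -- t.take (e.toNat - 1) contains '[' since e.toNat - 1 ≥ a1.length + 1
                have hlen : a1.length + 1 ≤ e.toNat - 1 := by omega
                have hsub : t.take (a1.length + 1) ⊆ t.take (e.toNat - 1) := by
                  intro x hx
                  have : t.take (a1.length + 1) = (t.take (e.toNat - 1)).take (a1.length + 1) := by
                    rw [List.take_take, min_eq_left hlen]
                  rw [this] at hx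
                  exact List.take_subset _ _ hx
                apply hsub
                have h1 : a1.take (a1.length + 1) = a1 := List.take_of_length_le (by omega)
                have h2 : a1.length + 1 - a1.length = 1 := by omega
                rw [ht_decomp, List.take_append, h1, h2]
                simp
              rw [if_neg (inner_not_valid_of_bracket hinner_mem)]
          · -- clean tag: same inner, same tail
            have hano2 : ∀ x ∈ a, x ≠ '[' ∧ x ≠ ']' := by
              intro x hx
              exact ⟨fun h0 => hbr (h0 ▸ hx), fun h0 => hano (h0 ▸ hx)⟩
            have ht_decomp : t = a ++ ']' :: b := by rw [← hsplit, hb]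
            have he_val : pvFmbAux t 1 1 = (a.length + 1 : Int) := by
              rw [ht_decomp, pvFmbAux_skip a _ 1 1 hano2]
              rw [show pvFmbAux (']' :: b) (1 + (a.length : Int)) 1 = 1 + (a.length : Int) from by
                simp [pvFmbAux]]
              ring
            have hinner_val : PySem.List.slice ('[' :: t) (some 1) (some (a.length + 1 : Int)) = a := by
              have : ((a.length + 1 : Int)) = ((a.length + 1 : Nat) : Int) := by push_cast; ring
              rw [this, show ((1:Int)) = ((1:Nat):Int) from rfl, PySem.List.slice_natCast]
              simp only [List.drop_one, List.tail_cons, Nat.add_sub_cancel]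
              rw [ht_decomp, List.take_append]
              simp
            have htail_val : PySem.List.slice ('[' :: t) (some ((a.length + 1 : Int) + 1)) none = b := by
              rw [show ((a.length + 1 : Int) + 1) = ((a.length + 2 : Nat) : Int) by push_cast; ring]
              rw [PySem.List.slice_from _ (by positivity)]
              simp only [Int.toNat_natCast]
              rw [show (a.length + 2) = (a.length + 1) + 1 by ring]
              rw [List.drop_succ_cons (l := t)]
              rw [ht_decomp, List.drop_append]
              simp
            rw [pvALoop, pvBLoop]
            rw [dif_pos (by simp [PySem.Chars.startswith, List.isPrefixOf])]
            rw [he0, he_val]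
            rw [dif_neg (show ¬((a.length : Int) + 1 < 0) by omega)]
            simp only [← ha, ← hf]
            rw [dif_neg (by rw [hb]; simp [hbr])]
            rw [hinner_val, htail_val, hb]
            simp only [List.drop_one, List.tail_cons]
            by_cases hv : PySem.Chars.lower (PySem.Chars.strip a) ∈ pvValidTags
            · rw [if_pos hv, if_pos hv]
              apply ih
              have h1 : b.length < t.length := by rw [ht_decomp]; simp; omega
              have h2 : (PySem.Chars.lstrip b).length ≤ b.length := List.length_dropWhile_le _ _
              simp only [List.length_cons] at hr
              omega
            · rw [if_neg hv, if_neg hv]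
        · -- no ']' anywhere: both break
          have heA : pvFmbAux t 1 1 = -1 :=
            pvFmbAux_no_close t 1 1 hcl
          have hfB : t.dropWhile (fun c => c ≠ ']') = [] := by
            rw [List.dropWhile_eq_nil_iff]
            intro x hx
            simp only [decide_eq_true_eq]
            intro h0; exact hcl (h0 ▸ hx)
          rw [pvALoop, pvBLoop]
          rw [dif_pos (by simp [PySem.Chars.startswith, List.isPrefixOf])]
          rw [he0]
          rw [dif_pos (by rw [heA]; norm_num)]
          rw [dif_pos (by rw [hfB]; simp)]
      · -- does not start with '['
        rw [pvALoop, pvBLoop]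
        rw [dif_neg (by
          simp [PySem.Chars.startswith, List.isPrefixOf]
          exact fun h => hc h.symm)]
        intro t' h
        injection h with h1 h2
        exact hc h1

-- ===== VERDICT (by name: the statement is the Claim_ definition above) =====
theorem strip_instrument_tag_py_spec : Claim_equal_strip_instrument_tag_py := by
  intro line _
  unfold Spec_strip_instrument_tag_py strip_instrument_tag_py strip_instrument_tag_py_alt
  rw [loop_eq (PySem.Chars.lstrip line.toList).length _ le_rfl]
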